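-- pv_equiv track=rewrite | github.com/AlgoritmiNarvik/SaMuGeD-Algoritmi-DrDreSamplerAI-2024 | testing_tools/test_scripts/almaz_scripts/simpleTests.py | detect_silence
-- ===== SOURCE A (Python) =====
-- def detect_silence(track, silence_threshold=100):
--     silent_regions = []
--     start = None
--     for i, note in enumerate(track):
--         if note[3] < silence_threshold:  # Using velocity as a proxy for silence
--             if start is None:
--                 start = note[1]
--         elif start is not None:
--             silent_regions.append((start, note[1]))
--             start = None
--     return silent_regions
-- ===== SOURCE B (Python) =====
-- def detect_silence(track, silence_threshold=100):
--     # Run-based scan: split the track into maximal runs of equal silence-predicate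
--     # and look only at the first note of each run.
--     silent_regions = []
--     pending = None
--     i, n = 0, len(track)
--     while i < n:
--         first = track[i]
--         is_silent = first[3] < silence_threshold
--         while i < n and (track[i][3] < silence_threshold) == is_silent:
--             i += 1
--         if is_silent:
--             pending = first[1]
--         elif pending is not None:
--             silent_regions.append((pending, first[1]))
--             pending = None
--     return silent_regions
-- ===== Notes on version B (the rewrite author's own statement) =====
-- stated objective: alternative
-- what changed: Replaces A's per-note state machine (start set/cleared on each note) by a run-based scan: the track is split into maximal runs of equal silence-predicate and only the first note of each run is inspected; a silent run records a pending start, a non-silent run following one closes the region.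
import Mathlib
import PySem

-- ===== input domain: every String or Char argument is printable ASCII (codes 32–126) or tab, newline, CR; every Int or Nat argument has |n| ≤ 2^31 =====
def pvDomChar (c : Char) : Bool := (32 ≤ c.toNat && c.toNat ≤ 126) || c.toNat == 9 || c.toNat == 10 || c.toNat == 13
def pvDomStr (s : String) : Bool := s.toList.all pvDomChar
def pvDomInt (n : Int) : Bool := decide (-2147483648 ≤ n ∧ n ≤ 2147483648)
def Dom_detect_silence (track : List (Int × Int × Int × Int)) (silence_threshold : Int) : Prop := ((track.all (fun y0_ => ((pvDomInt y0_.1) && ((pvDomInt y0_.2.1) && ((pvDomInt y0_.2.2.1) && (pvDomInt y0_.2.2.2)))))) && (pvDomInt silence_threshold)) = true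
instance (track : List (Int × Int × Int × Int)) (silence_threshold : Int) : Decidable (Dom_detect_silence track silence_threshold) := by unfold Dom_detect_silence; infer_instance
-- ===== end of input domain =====

-- B replaces A's per-note start/clear state machine by a scan over maximal runs of
-- equal silence-predicate, inspecting only the first note of each run (objective: alternative).
-- ===== PORT A =====
def dsGo (thr : Int) : List (Int × Int × Int × Int) → Option Int → List (Int × Int) → List (Int × Int)
  | [], _, acc => acc
  | note :: rest, start, acc =>
    if note.2.2.2 < thr then
      match start with
      | none => dsGo thr rest (some note.2.1) acc
      | some s => dsGo thr rest (some s) acc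
    else
      match start with
      | some s => dsGo thr rest none (acc ++ [(s, note.2.1)])
      | none => dsGo thr rest none acc

def detect_silence (track : List (Int × Int × Int × Int)) (silence_threshold : Int) : List (Int × Int) :=
  dsGo silence_threshold track none []

-- ===== PORT B =====
-- inner while loop of Source B: one maximal run of equal predicate-value; outer while = pvRuns
def pvRuns (p : (Int × Int × Int × Int) → Bool) :
    List (Int × Int × Int × Int) → List (Bool × List (Int × Int × Int × Int))
  | [] => []
  | x :: xs =>
    (p x, x :: xs.takeWhile (fun y => p y == p x)) :: pvRuns p (xs.dropWhile (fun y => p y == p x))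
termination_by l => l.length
decreasing_by
  simpa using Nat.lt_succ_of_le (xs.length_dropWhile_le _)

def altGo (thr : Int) : List (Bool × List (Int × Int × Int × Int)) → Option Int → List (Int × Int) → List (Int × Int)
  | [], _, acc => acc
  | (isSilent, notes) :: rest, pending, acc =>
    -- runs produced by pvRuns are nonempty, so the default of headD is never used
    let first := notes.headD (0, 0, 0, 0)
    if isSilent then altGo thr rest (some first.2.1) acc
    else
      match pending with
      | some s => altGo thr rest none (acc ++ [(s, first.2.1)])
      | none => altGo thr rest none acc

def detect_silence_alt (track : List (Int × Int × Int × Int)) (silence_threshold : Int) : List (Int × Int) :=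
  altGo silence_threshold (pvRuns (fun n => decide (n.2.2.2 < silence_threshold)) track) none []

-- ===== PRECONDITION & SPEC =====
def Spec_detect_silence (track : List (Int × Int × Int × Int)) (silence_threshold : Int) (out : List (Int × Int)) : Prop := out = detect_silence_alt track silence_threshold
instance (track : List (Int × Int × Int × Int)) (silence_threshold : Int) (out : List (Int × Int)) : Decidable (Spec_detect_silence track silence_threshold out) := by unfold Spec_detect_silence; infer_instance

-- ===== CLAIM =====
def Claim_equal_detect_silence : Prop := ∀ (track : List (Int × Int × Int × Int)) (silence_threshold : Int), Dom_detect_silence track silence_threshold → Spec_detect_silence track silence_threshold (detect_silence track silence_threshold)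

-- ===== LEMMAS AND PROOFS =====

theorem dsGo_skip_silent (thr : Int) (r rest : List (Int × Int × Int × Int)) (s : Int)
    (acc : List (Int × Int)) (h : ∀ y ∈ r, y.2.2.2 < thr) :
    dsGo thr (r ++ rest) (some s) acc = dsGo thr rest (some s) acc := by
  induction r with
  | nil => rfl
  | cons x xs ih =>
    simp only [List.cons_append, dsGo, if_pos (h x (by simp))]
    exact ih (fun y hy => h y (by simp [hy]))

theorem dsGo_skip_loud (thr : Int) (r rest : List (Int × Int × Int × Int))
    (acc : List (Int × Int)) (h : ∀ y ∈ r, ¬ y.2.2.2 < thr) :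
    dsGo thr (r ++ rest) none acc = dsGo thr rest none acc := by
  induction r with
  | nil => rfl
  | cons x xs ih =>
    simp only [List.cons_append, dsGo, if_neg (h x (by simp))]
    exact ih (fun y hy => h y (by simp [hy]))

theorem head?_dropWhile_not (p : (Int × Int × Int × Int) → Bool) :
    ∀ (l : List (Int × Int × Int × Int)) (x : Int × Int × Int × Int),
    (l.dropWhile p).head? = some x → p x = false := by
  intro l
  induction l with
  | nil => intro x h; simp [List.dropWhile] at h
  | cons a l ih =>
    intro x h
    by_cases hp : p a
    · exact ih x (by simpa [List.dropWhile_cons, hp] using h)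
    · simp [hp] at h
      simpa [← h] using hp

theorem key (thr : Int) : ∀ (k : Nat) (track : List (Int × Int × Int × Int)),
    track.length ≤ k → ∀ (start : Option Int) (acc : List (Int × Int)),
    (start = none ∨ ∀ x, track.head? = some x → ¬ x.2.2.2 < thr) →
    dsGo thr track start acc
      = altGo thr (pvRuns (fun n => decide (n.2.2.2 < thr)) track) start acc := by
  intro k
  induction k with
  | zero =>
    intro track hlen start acc _
    have h0 : track = [] := List.eq_nil_of_length_eq_zero (Nat.le_zero.mp hlen)
    subst h0; cases start <;> simp [dsGo, pvRuns, altGo]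
  | succ k ih =>
    intro track hlen start acc hcond
    match track with
    | [] => cases start <;> simp [dsGo, pvRuns, altGo]
    | x :: xs =>
      set p : (Int × Int × Int × Int) → Bool := fun n => decide (n.2.2.2 < thr) with hpdef
      set q : (Int × Int × Int × Int) → Bool := fun y => p y == p x with hqdef
      have hsplit : xs.takeWhile q ++ xs.dropWhile q = xs := List.takeWhile_append_dropWhile
      have hdroplen : (xs.dropWhile q).length ≤ k := by
        have := xs.length_dropWhile_le q
        simp at hlen; omega
      have hdrophead : ∀ y, (xs.dropWhile q).head? = some y → p y ≠ p x := by
        intro y hy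
        have := head?_dropWhile_not q xs y hy
        simpa [hqdef] using this
      by_cases hx : x.2.2.2 < thr
      · -- silent run: start must be none
        have hstart : start = none := by
          rcases hcond with h | h
          · exact h
          · exact absurd hx (h x rfl)
        subst hstart
        have htake : ∀ y ∈ xs.takeWhile q, y.2.2.2 < thr := by
          intro y hy
          have := List.mem_takeWhile_imp hy
          simp [hqdef, hpdef, hx] at this
          exact this
        have hA : dsGo thr (x :: xs) none acc
            = dsGo thr (xs.dropWhile q) (some x.2.1) acc := by
          rw [show dsGo thr (x :: xs) none acc = dsGo thr xs (some x.2.1) acc by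
            simp [dsGo, if_pos hx]]
          conv_lhs => rw [← hsplit]
          exact dsGo_skip_silent thr _ _ _ _ htake
        have hB : altGo thr (pvRuns p (x :: xs)) none acc
            = altGo thr (pvRuns p (xs.dropWhile q)) (some x.2.1) acc := by
          rw [pvRuns]
          simp only [altGo, hpdef, hx, decide_true, if_pos, List.headD_cons]
          have hq : (fun y : Int × Int × Int × Int => decide (y.2.2.2 < thr) == true) = q := by
            funext y; simp [hqdef, hpdef, hx]
          rw [hq]
        rw [hA, hB]
        apply ih _ hdroplen
        right
        intro y hy
        have := hdrophead y hy
        simp [hpdef, hx] at this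
        omega
      · -- loud run
        have htake : ∀ y ∈ xs.takeWhile q, ¬ y.2.2.2 < thr := by
          intro y hy
          have := List.mem_takeWhile_imp hy
          simp [hqdef, hpdef, hx] at this
          omega
        have hnext' : (none : Option Int) = none ∨
            ∀ y, (xs.dropWhile q).head? = some y → ¬ y.2.2.2 < thr := Or.inl rfl
        cases start with
        | none =>
          have hA : dsGo thr (x :: xs) none acc = dsGo thr (xs.dropWhile q) none acc := by
            rw [show dsGo thr (x :: xs) none acc = dsGo thr xs none acc by
              simp [dsGo, if_neg hx]]
            conv_lhs => rw [← hsplit]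
            exact dsGo_skip_loud thr _ _ _ htake
          have hB : altGo thr (pvRuns p (x :: xs)) none acc
              = altGo thr (pvRuns p (xs.dropWhile q)) none acc := by
            rw [pvRuns]
            simp only [altGo, hpdef, hx, decide_false, Bool.false_eq_true, if_false,
              List.headD_cons]
            have hq : (fun y : Int × Int × Int × Int => decide (y.2.2.2 < thr) == false) = q := by
              funext y; simp [hqdef, hpdef, hx]
            rw [hq]
          rw [hA, hB]
          exact ih _ hdroplen none acc hnext'
        | some s =>
          have hA : dsGo thr (x :: xs) (some s) acc
              = dsGo thr (xs.dropWhile q) none (acc ++ [(s, x.2.1)]) := by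
            rw [show dsGo thr (x :: xs) (some s) acc
                = dsGo thr xs none (acc ++ [(s, x.2.1)]) by
              simp [dsGo, if_neg hx]]
            conv_lhs => rw [← hsplit]
            exact dsGo_skip_loud thr _ _ _ htake
          have hB : altGo thr (pvRuns p (x :: xs)) (some s) acc
              = altGo thr (pvRuns p (xs.dropWhile q)) none (acc ++ [(s, x.2.1)]) := by
            rw [pvRuns]
            simp only [altGo, hpdef, hx, decide_false, Bool.false_eq_true, if_false,
              List.headD_cons]
            have hq : (fun y : Int × Int × Int × Int => decide (y.2.2.2 < thr) == false) = q := by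
              funext y; simp [hqdef, hpdef, hx]
            rw [hq]
          rw [hA, hB]
          exact ih _ hdroplen none _ hnext'

-- ===== VERDICT =====
theorem detect_silence_spec : Claim_equal_detect_silence := by
  intro track thr _
  unfold Spec_detect_silence detect_silence detect_silence_alt
  exact key thr track.length track le_rfl none [] (Or.inl rfl)
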